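-- pv_equiv track=rewrite | github.com/OnjLouis/nvdaComposer | source/globalPlugins/nvdaComposer.py | _rng_nearest_bpm_code
-- ===== SOURCE A (Python) =====
-- _RNG_BPM_TABLE = [
--     25, 28, 31, 35, 40, 45, 50, 56,
--     63, 70, 80, 90, 100, 112, 125, 140,
--     160, 180, 200, 225, 250, 285, 320, 355,
--     400, 450, 500, 565, 635, 715, 800, 900,
-- ]
--
-- def _rng_nearest_bpm_code(bpm: int) -> int:
--     bpm = int(bpm)
--     best = 0
--     best_err = 10**9
--     for i, v in enumerate(_RNG_BPM_TABLE):
--         err = abs(int(v) - bpm)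
--         if err < best_err:
--             best_err = err
--             best = i
--     return best
-- ===== SOURCE B (Python) =====
-- _RNG_BPM_TABLE = [
--     25, 28, 31, 35, 40, 45, 50, 56,
--     63, 70, 80, 90, 100, 112, 125, 140,
--     160, 180, 200, 225, 250, 285, 320, 355,
--     400, 450, 500, 565, 635, 715, 800, 900,
-- ]
--
--
-- def _rng_nearest_bpm_code(bpm: int) -> int:
--     bpm = int(bpm)
--     # binary search for the insertion point (bisect_left by hand)
--     lo, hi = 0, len(_RNG_BPM_TABLE)
--     while lo < hi:
--         mid = (lo + hi) // 2
--         if _RNG_BPM_TABLE[mid] < bpm: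
--             lo = mid + 1
--         else:
--             hi = mid
--     if lo == 0:
--         return 0
--     if lo == len(_RNG_BPM_TABLE):
--         return len(_RNG_BPM_TABLE) - 1
--     # strict '<' so that exact midpoints fall to the lower index
--     if _RNG_BPM_TABLE[lo] - bpm < bpm - _RNG_BPM_TABLE[lo - 1]:
--         return lo
--     return lo - 1
-- ===== Notes on version B (the rewrite author's own statement) =====
-- stated objective: alternative
-- what changed: Replaces A's linear scan over all 32 table entries (tracking best index and best error) with a hand-rolled binary search for the insertion point in the sorted table followed by one comparison of the two neighbouring entries.
-- intended difference: For bpm >= 10**9 + 900 every distance to a table entry reaches A's 10**9 sentinel, so A's loop never updates and it returns 0; B returns 31 (index of 900, the nearest value), which is the intended nearest-BPM index. — e.g. on _rng_nearest_bpm_code(1000000900): A returns 0, B returns 31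
import Mathlib
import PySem

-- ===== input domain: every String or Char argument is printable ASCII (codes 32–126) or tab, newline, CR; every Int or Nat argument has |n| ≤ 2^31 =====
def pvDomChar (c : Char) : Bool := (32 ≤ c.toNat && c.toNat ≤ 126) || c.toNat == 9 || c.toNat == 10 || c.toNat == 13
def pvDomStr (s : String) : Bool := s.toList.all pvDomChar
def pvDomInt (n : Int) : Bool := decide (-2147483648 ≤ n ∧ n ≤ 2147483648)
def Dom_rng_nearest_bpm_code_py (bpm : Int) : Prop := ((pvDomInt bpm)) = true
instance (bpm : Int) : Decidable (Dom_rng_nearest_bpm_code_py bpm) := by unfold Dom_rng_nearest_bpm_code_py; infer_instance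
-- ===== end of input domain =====

-- B replaces A's linear best-error scan by a binary search on the sorted table plus one
-- neighbour comparison (alternative algorithm, same cost at this table size).

-- ===== PORT A =====
def rngBpmTable : List Int :=
  [25, 28, 31, 35, 40, 45, 50, 56,
   63, 70, 80, 90, 100, 112, 125, 140,
   160, 180, 200, 225, 250, 285, 320, 355,
   400, 450, 500, 565, 635, 715, 800, 900]

-- the 'for i, v in enumerate(...)' loop, threading the (best, best_err) state
def loopA (bpm : Int) : List (Int × Int) → Int × Int → Int × Int
  | [], st => st
  | p :: rest, st =>
      let err := |p.2 - bpm|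
      if err < st.2 then loopA bpm rest (p.1, err) else loopA bpm rest st

def rng_nearest_bpm_code_py (bpm : Int) : Int :=
  (loopA bpm (PySem.List.enumerate rngBpmTable) (0, 10 ^ 9)).1

-- ===== PORT B =====
-- the 'while lo < hi' binary-search loop; fuel only makes the recursion structural
-- (32 ≥ the number of iterations, since hi - lo starts at 32 and strictly shrinks);
-- indices mid, lo-1, lo fed to pyGet? are always in range at the call sites, so getD 0 never fires
def bLoop (bpm : Int) : Nat → Int → Int → Int
  | 0, lo, _ => lo
  | fuel + 1, lo, hi =>
      if lo < hi then
        let mid := PySem.Int.floordiv (lo + hi) 2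
        if (PySem.List.pyGet? rngBpmTable mid).getD 0 < bpm then bLoop bpm fuel (mid + 1) hi
        else bLoop bpm fuel lo mid
      else lo

def rng_nearest_bpm_code_py_alt (bpm : Int) : Int :=
  let lo := bLoop bpm 32 0 (rngBpmTable.length : Int)
  if lo = 0 then 0
  else if lo = (rngBpmTable.length : Int) then (rngBpmTable.length : Int) - 1
  else if (PySem.List.pyGet? rngBpmTable lo).getD 0 - bpm < bpm - (PySem.List.pyGet? rngBpmTable (lo - 1)).getD 0 then lo
  else lo - 1

-- ===== PRECONDITION & SPEC =====
-- For bpm ≥ 10^9 + 900 every distance to a table entry reaches A's 10^9 sentinel, so A's loop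
-- never updates and A returns 0; B returns 31 (index of 900, the nearest value), the intended result.
def D_rng_nearest_bpm_code_py (bpm : Int) : Prop := 10 ^ 9 + 900 ≤ bpm
instance (bpm : Int) : Decidable (D_rng_nearest_bpm_code_py bpm) := by
  unfold D_rng_nearest_bpm_code_py; infer_instance

def Spec_rng_nearest_bpm_code_py (bpm : Int) (out : Int) : Prop :=
  ¬ D_rng_nearest_bpm_code_py bpm → out = rng_nearest_bpm_code_py_alt bpm
instance (bpm : Int) (out : Int) : Decidable (Spec_rng_nearest_bpm_code_py bpm out) := by
  unfold Spec_rng_nearest_bpm_code_py; infer_instance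

def pvDiffWitness_rng_nearest_bpm_code_py : Int := 1000000900
def pvDiffWitnessOut_rng_nearest_bpm_code_py : Int × Int := (0, 31)

-- ===== CLAIM (what is proved, stated in full; the proofs are below) =====
def Claim_unchanged_rng_nearest_bpm_code_py : Prop := ∀ (bpm : Int), Dom_rng_nearest_bpm_code_py bpm → Spec_rng_nearest_bpm_code_py bpm (rng_nearest_bpm_code_py bpm)
def Claim_changed_rng_nearest_bpm_code_py : Prop := Dom_rng_nearest_bpm_code_py (pvDiffWitness_rng_nearest_bpm_code_py) ∧ D_rng_nearest_bpm_code_py (pvDiffWitness_rng_nearest_bpm_code_py) ∧ rng_nearest_bpm_code_py (pvDiffWitness_rng_nearest_bpm_code_py) = pvDiffWitnessOut_rng_nearest_bpm_code_py.1 ∧ rng_nearest_bpm_code_py_alt (pvDiffWitness_rng_nearest_bpm_code_py) = pvDiffWitnessOut_rng_nearest_bpm_code_py.2 ∧ pvDiffWitnessOut_rng_nearest_bpm_code_py.1 ≠ pvDiffWitnessOut_rng_nearest_bpm_code_py.2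
def Claim_exact_rng_nearest_bpm_code_py : Prop := ∀ (bpm : Int), Dom_rng_nearest_bpm_code_py bpm → D_rng_nearest_bpm_code_py bpm → rng_nearest_bpm_code_py bpm ≠ rng_nearest_bpm_code_py_alt bpm

-- ===== LEMMAS AND PROOFS =====

-- if no remaining entry beats the current best error, the state never changes
theorem loopA_cons (bpm : Int) (p : Int × Int) (rest : List (Int × Int)) (st : Int × Int) :
    loopA bpm (p :: rest) st =
      if |p.2 - bpm| < st.2 then loopA bpm rest (p.1, |p.2 - bpm|) else loopA bpm rest st := rfl

theorem loopA_noupdate (bpm : Int) : ∀ (l : List (Int × Int)) (st : Int × Int),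
    (∀ p ∈ l, st.2 ≤ |p.2 - bpm|) → loopA bpm l st = st := by
  intro l
  induction l with
  | nil => intro st _; rfl
  | cons p rest ih =>
      intro st h
      have hp := h p (by simp)
      simp only [loopA, if_neg (not_lt.mpr hp)]
      exact ih st (fun q hq => h q (by simp [hq]))

theorem loopA_append (bpm : Int) : ∀ (l1 l2 : List (Int × Int)) (st : Int × Int),
    loopA bpm (l1 ++ l2) st = loopA bpm l2 (loopA bpm l1 st) := by
  intro l1
  induction l1 with
  | nil => intro l2 st; rfl
  | cons p rest ih =>
      intro l2 st
      simp only [List.cons_append, loopA]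
      split <;> exact ih l2 _

-- running over entries all ≤ 800 keeps the best error above bpm - 900 (for bpm ≥ 900)
theorem loopA_snd_gt (bpm : Int) (hb : 900 ≤ bpm) : ∀ (l : List (Int × Int)) (st : Int × Int),
    bpm - 900 < st.2 → (∀ p ∈ l, p.2 ≤ 800) → bpm - 900 < (loopA bpm l st).2 := by
  intro l
  induction l with
  | nil => intro st h _; exact h
  | cons p rest ih =>
      intro st h hl
      have hp : p.2 ≤ 800 := hl p (by simp)
      have hrest : ∀ q ∈ rest, q.2 ≤ 800 := fun q hq => hl q (by simp [hq])
      simp only [loopA]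
      split
      · exact ih _ (by rw [abs_of_nonpos (by omega)]; omega) hrest
      · exact ih _ h hrest

def eTable : List (Int × Int) := PySem.List.enumerate rngBpmTable

theorem eTable_eq : eTable =
    [(0,25),(1,28),(2,31),(3,35),(4,40),(5,45),(6,50),(7,56),
     (8,63),(9,70),(10,80),(11,90),(12,100),(13,112),(14,125),(15,140),
     (16,160),(17,180),(18,200),(19,225),(20,250),(21,285),(22,320),(23,355),
     (24,400),(25,450),(26,500),(27,565),(28,635),(29,715),(30,800),(31,900)] := by
  decide

theorem A_low (bpm : Int) (h : bpm ≤ 25) : rng_nearest_bpm_code_py bpm = 0 := by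
  have hrest : ∀ p ∈ ([(1,28),(2,31),(3,35),(4,40),(5,45),(6,50),(7,56),
     (8,63),(9,70),(10,80),(11,90),(12,100),(13,112),(14,125),(15,140),
     (16,160),(17,180),(18,200),(19,225),(20,250),(21,285),(22,320),(23,355),
     (24,400),(25,450),(26,500),(27,565),(28,635),(29,715),(30,800),(31,900)] :
        List (Int × Int)), (28:Int) ≤ p.2 := by decide
  show (loopA bpm (PySem.List.enumerate rngBpmTable) (0, 10 ^ 9)).1 = 0
  rw [show PySem.List.enumerate rngBpmTable = eTable from rfl, eTable_eq, loopA_cons]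
  by_cases hc : |(25:Int) - bpm| < (10:Int) ^ 9
  · rw [if_pos hc, loopA_noupdate]
    intro p hp
    have h28 := hrest p hp
    rw [abs_of_nonneg (by omega), abs_of_nonneg (by omega)]
    omega
  · rw [if_neg hc, loopA_noupdate]
    rw [abs_of_nonneg (by omega)] at hc
    intro p hp
    have h28 := hrest p hp
    rw [abs_of_nonneg (by omega)]
    omega

theorem A_high (bpm : Int) (h1 : 901 ≤ bpm) (h2 : bpm ≤ 10 ^ 9 + 899) :
    rng_nearest_bpm_code_py bpm = 31 := by
  have hpre : ∀ p ∈ ([(0,25),(1,28),(2,31),(3,35),(4,40),(5,45),(6,50),(7,56),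
     (8,63),(9,70),(10,80),(11,90),(12,100),(13,112),(14,125),(15,140),
     (16,160),(17,180),(18,200),(19,225),(20,250),(21,285),(22,320),(23,355),
     (24,400),(25,450),(26,500),(27,565),(28,635),(29,715),(30,800)] :
        List (Int × Int)), p.2 ≤ (800:Int) := by decide
  show (loopA bpm (PySem.List.enumerate rngBpmTable) (0, 10 ^ 9)).1 = 31
  rw [show PySem.List.enumerate rngBpmTable = eTable from rfl, eTable_eq,
      show ([(0,25),(1,28),(2,31),(3,35),(4,40),(5,45),(6,50),(7,56),
     (8,63),(9,70),(10,80),(11,90),(12,100),(13,112),(14,125),(15,140),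
     (16,160),(17,180),(18,200),(19,225),(20,250),(21,285),(22,320),(23,355),
     (24,400),(25,450),(26,500),(27,565),(28,635),(29,715),(30,800),(31,900)] :
        List (Int × Int)) =
     [(0,25),(1,28),(2,31),(3,35),(4,40),(5,45),(6,50),(7,56),
     (8,63),(9,70),(10,80),(11,90),(12,100),(13,112),(14,125),(15,140),
     (16,160),(17,180),(18,200),(19,225),(20,250),(21,285),(22,320),(23,355),
     (24,400),(25,450),(26,500),(27,565),(28,635),(29,715),(30,800)] ++ [((31:Int),(900:Int))] from rfl,
     loopA_append]
  have hst := loopA_snd_gt bpm (by omega) _ ((0:Int), (10:Int) ^ 9) (by norm_num; omega) hpre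
  rw [loopA_cons, if_pos (by rw [abs_of_nonpos (by omega)]; omega)]
  rfl

theorem A_sentinel (bpm : Int) (h : 10 ^ 9 + 900 ≤ bpm) : rng_nearest_bpm_code_py bpm = 0 := by
  have htab : ∀ p ∈ eTable, p.2 ≤ (900:Int) := by rw [eTable_eq]; decide
  show (loopA bpm (PySem.List.enumerate rngBpmTable) (0, 10 ^ 9)).1 = 0
  rw [show PySem.List.enumerate rngBpmTable = eTable from rfl, loopA_noupdate]
  intro p hp
  have := htab p hp
  rw [abs_of_nonpos (by omega)]
  omega

-- one unfolding of the binary-search loop with concrete midpoint and table value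
theorem bstep (bpm : Int) (fuel : Nat) (lo hi mid v : Int) (h : lo < hi)
    (hm : PySem.Int.floordiv (lo + hi) 2 = mid)
    (hv : (PySem.List.pyGet? rngBpmTable mid).getD 0 = v) :
    bLoop bpm (fuel + 1) lo hi =
      if v < bpm then bLoop bpm fuel (mid + 1) hi else bLoop bpm fuel lo mid := by
  simp only [bLoop, if_pos h, hm, hv]

theorem B_low (bpm : Int) (h : bpm ≤ 25) : rng_nearest_bpm_code_py_alt bpm = 0 := by
  have s1 : bLoop bpm 32 0 32 = bLoop bpm 31 0 16 := by
    rw [bstep bpm 31 0 32 16 160 (by norm_num) (by decide) (by decide), if_neg (by omega)]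
  have s2 : bLoop bpm 31 0 16 = bLoop bpm 30 0 8 := by
    rw [bstep bpm 30 0 16 8 63 (by norm_num) (by decide) (by decide), if_neg (by omega)]
  have s3 : bLoop bpm 30 0 8 = bLoop bpm 29 0 4 := by
    rw [bstep bpm 29 0 8 4 40 (by norm_num) (by decide) (by decide), if_neg (by omega)]
  have s4 : bLoop bpm 29 0 4 = bLoop bpm 28 0 2 := by
    rw [bstep bpm 28 0 4 2 31 (by norm_num) (by decide) (by decide), if_neg (by omega)]
  have s5 : bLoop bpm 28 0 2 = bLoop bpm 27 0 1 := by
    rw [bstep bpm 27 0 2 1 28 (by norm_num) (by decide) (by decide), if_neg (by omega)]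
  have s6 : bLoop bpm 27 0 1 = bLoop bpm 26 0 0 := by
    rw [bstep bpm 26 0 1 0 25 (by norm_num) (by decide) (by decide), if_neg (by omega)]
  have hloop : bLoop bpm 32 0 32 = 0 := by rw [s1, s2, s3, s4, s5, s6]; rfl
  simp only [rng_nearest_bpm_code_py_alt, show ((rngBpmTable.length : Int)) = 32 from rfl, hloop]
  norm_num

theorem B_high (bpm : Int) (h : 901 ≤ bpm) : rng_nearest_bpm_code_py_alt bpm = 31 := by
  have s1 : bLoop bpm 32 0 32 = bLoop bpm 31 17 32 := by
    rw [bstep bpm 31 0 32 16 160 (by norm_num) (by decide) (by decide), if_pos (by omega)]; norm_num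
  have s2 : bLoop bpm 31 17 32 = bLoop bpm 30 25 32 := by
    rw [bstep bpm 30 17 32 24 400 (by norm_num) (by decide) (by decide), if_pos (by omega)]; norm_num
  have s3 : bLoop bpm 30 25 32 = bLoop bpm 29 29 32 := by
    rw [bstep bpm 29 25 32 28 635 (by norm_num) (by decide) (by decide), if_pos (by omega)]; norm_num
  have s4 : bLoop bpm 29 29 32 = bLoop bpm 28 31 32 := by
    rw [bstep bpm 28 29 32 30 800 (by norm_num) (by decide) (by decide), if_pos (by omega)]; norm_num
  have s5 : bLoop bpm 28 31 32 = bLoop bpm 27 32 32 := by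
    rw [bstep bpm 27 31 32 31 900 (by norm_num) (by decide) (by decide), if_pos (by omega)]; norm_num
  have hloop : bLoop bpm 32 0 32 = 32 := by rw [s1, s2, s3, s4, s5]; rfl
  simp only [rng_nearest_bpm_code_py_alt, show ((rngBpmTable.length : Int)) = 32 from rfl, hloop]
  norm_num

set_option maxHeartbeats 2000000 in
set_option maxRecDepth 100000 in
theorem mid_eq : ∀ n : Nat, n < 876 →
    rng_nearest_bpm_code_py (25 + (n : Int)) = rng_nearest_bpm_code_py_alt (25 + (n : Int)) := by
  decide

-- ===== VERDICT (by name: the statement is the Claim_ definition above) =====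
theorem rng_nearest_bpm_code_py_spec : Claim_unchanged_rng_nearest_bpm_code_py := by
  intro bpm _ hnd
  have hbd : bpm ≤ 10 ^ 9 + 899 := by
    unfold D_rng_nearest_bpm_code_py at hnd; omega
  by_cases hlo : bpm ≤ 25
  · rw [A_low bpm hlo, B_low bpm hlo]
  · by_cases hm : bpm ≤ 900
    · obtain ⟨n, hn⟩ : ∃ n : Nat, bpm = 25 + (n : Int) ∧ n < 876 := by
        refine ⟨(bpm - 25).toNat, by omega, by omega⟩
      rw [hn.1]
      exact mid_eq n hn.2
    · rw [A_high bpm (by omega) hbd, B_high bpm (by omega)]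

theorem rng_nearest_bpm_code_py_changed : Claim_changed_rng_nearest_bpm_code_py := by
  unfold Claim_changed_rng_nearest_bpm_code_py
  refine ⟨by decide, by decide, ?_, ?_, by decide⟩
  · exact A_sentinel _ (by unfold pvDiffWitness_rng_nearest_bpm_code_py; norm_num)
  · exact B_high _ (by unfold pvDiffWitness_rng_nearest_bpm_code_py; norm_num)

theorem rng_nearest_bpm_code_py_tight : Claim_exact_rng_nearest_bpm_code_py := by
  intro bpm _ hd
  unfold D_rng_nearest_bpm_code_py at hd
  rw [A_sentinel bpm hd, B_high bpm (by omega)]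
  norm_num
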